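-- pv_equiv track=rewrite | github.com/VincentYChia/Game-1 | Game-1-modular/systems/geography/nation_generator.py | _find_nearest_nation
-- ===== SOURCE A (Python) =====
-- from typing import Dict, List, Optional, Set, Tuple
--
-- def _find_nearest_nation(
--     x: int, y: int, exclude_nation: int,
--     nation_map: Dict[Tuple[int, int], int],
-- ) -> int:
--     """Find the nearest nation to (x, y) excluding a specific nation."""
--     for radius in range(1, 50):
--         for dx in range(-radius, radius + 1):
--             for dy in range(-radius, radius + 1):
--                 if abs(dx) == radius or abs(dy) == radius:
--                     pos = (x + dx, y + dy)
--                     if pos in nation_map and nation_map[pos] != exclude_nation: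
--                         return nation_map[pos]
--     return 0  # Fallback
-- ===== SOURCE B (Python) =====
-- def _find_nearest_nation(x, y, exclude_nation, nation_map):
--     """Single pass over the map: keep the candidate minimizing (radius, dx, dy)."""
--     best = None  # (key, nation)
--     for (px, py), nation in nation_map.items():
--         if nation != exclude_nation:
--             dx = px - x
--             dy = py - y
--             r = max(abs(dx), abs(dy))
--             if 1 <= r <= 49:
--                 k = (r, dx, dy)
--                 if best is None or k < best[0]:
--                     best = (k, nation)
--     return 0 if best is None else best[1]
-- ===== Notes on version B (the rewrite author's own statement) =====
-- stated objective: faster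
-- what changed: Replaces A's expanding-ring probing of up to 99x99 grid cells (each with a dict lookup) by a single pass over the dict's items that keeps the entry minimizing the key (max(|dx|,|dy|), dx, dy) within radius 1..49, which reproduces A's scan order exactly.
import Mathlib
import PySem

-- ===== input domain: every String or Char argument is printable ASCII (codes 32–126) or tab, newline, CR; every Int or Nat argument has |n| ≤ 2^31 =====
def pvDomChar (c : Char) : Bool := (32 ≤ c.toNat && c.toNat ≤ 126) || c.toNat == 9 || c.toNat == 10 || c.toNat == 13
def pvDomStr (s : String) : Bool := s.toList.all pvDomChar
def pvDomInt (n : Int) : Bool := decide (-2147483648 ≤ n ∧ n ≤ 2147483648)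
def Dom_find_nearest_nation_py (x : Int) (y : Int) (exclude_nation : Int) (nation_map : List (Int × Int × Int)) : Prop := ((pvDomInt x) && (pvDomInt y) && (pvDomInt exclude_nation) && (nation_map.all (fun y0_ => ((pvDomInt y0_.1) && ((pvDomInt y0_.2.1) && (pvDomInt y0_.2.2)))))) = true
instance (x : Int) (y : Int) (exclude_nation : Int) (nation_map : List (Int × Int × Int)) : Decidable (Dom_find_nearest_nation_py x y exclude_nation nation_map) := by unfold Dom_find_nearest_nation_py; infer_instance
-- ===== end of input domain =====

-- B replaces A's expanding-ring grid probing (up to 99×99 lookups) by a single pass over the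
-- map's entries keeping the candidate that minimizes the key (radius, dx, dy) — same result.

-- ===== PORT A =====
-- dict lookup: `pos in nation_map` / `nation_map[pos]`, first matching key in insertion order
def pvGetPos? (m : List (Int × Int × Int)) (px py : Int) : Option Int :=
  (m.find? (fun t => t.1 == px && t.2.1 == py)).map (fun t => t.2.2)

-- early-return for-loop: fold that keeps the first `some`
def pvLoop {β : Type} (l : List Int) (f : Int → Option β) : Option β :=
  l.foldl (fun acc z => match acc with | some v => some v | none => f z) none

def find_nearest_nation_py (x : Int) (y : Int) (exclude_nation : Int) (nation_map : List (Int × Int × Int)) : Int :=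
  let res := pvLoop (PySem.List.pyRange 1 50 1) (fun radius =>
    pvLoop (PySem.List.pyRange (-radius) (radius+1) 1) (fun dx =>
      pvLoop (PySem.List.pyRange (-radius) (radius+1) 1) (fun dy =>
        if |dx| = radius ∨ |dy| = radius then
          match pvGetPos? nation_map (x + dx) (y + dy) with
          | some v => if v ≠ exclude_nation then some v else none
          | none => none
        else none)))
  match res with
  | some v => v
  | none => 0

-- ===== PORT B =====
-- lexicographic `<` on the (radius, dx, dy) key
def pvKeyLt (a b : Int × Int × Int) : Bool :=
  decide (a.1 < b.1) || (decide (a.1 = b.1) &&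
    (decide (a.2.1 < b.2.1) || (decide (a.2.1 = b.2.1) && decide (a.2.2 < b.2.2))))

def pvBestStep (x y exclude_nation : Int) (best : Option ((Int × Int × Int) × Int))
    (t : Int × Int × Int) : Option ((Int × Int × Int) × Int) :=
  if t.2.2 ≠ exclude_nation then
    let dx := t.1 - x
    let dy := t.2.1 - y
    let r := max |dx| |dy|
    if 1 ≤ r ∧ r ≤ 49 then
      match best with
      | none => some ((r, dx, dy), t.2.2)
      | some b => if pvKeyLt (r, dx, dy) b.1 then some ((r, dx, dy), t.2.2) else some b
    else best
  else best

def find_nearest_nation_py_alt (x : Int) (y : Int) (exclude_nation : Int) (nation_map : List (Int × Int × Int)) : Int :=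
  match nation_map.foldl (pvBestStep x y exclude_nation) none with
  | some b => b.2
  | none => 0

-- ===== PRECONDITION & SPEC =====
-- Pre_ excludes association lists with a duplicated (x, y) key: such a list does not represent
-- any Python dict (A's parameter type), so the first-match assoc-list reading is ambiguous there.
def Pre_find_nearest_nation_py (x : Int) (y : Int) (exclude_nation : Int) (nation_map : List (Int × Int × Int)) : Prop :=
  nation_map.Pairwise (fun s t => (s.1, s.2.1) ≠ (t.1, t.2.1))
instance (x : Int) (y : Int) (exclude_nation : Int) (nation_map : List (Int × Int × Int)) : Decidable (Pre_find_nearest_nation_py x y exclude_nation nation_map) := by unfold Pre_find_nearest_nation_py; infer_instance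

def pvWitness_find_nearest_nation_py : Int × Int × Int × (List (Int × Int × Int)) := (0, 0, 0, [(1, 0, 5), (3, 3, 2)])

def Spec_find_nearest_nation_py (x : Int) (y : Int) (exclude_nation : Int) (nation_map : List (Int × Int × Int)) (out : Int) : Prop := out = find_nearest_nation_py_alt x y exclude_nation nation_map
instance (x : Int) (y : Int) (exclude_nation : Int) (nation_map : List (Int × Int × Int)) (out : Int) : Decidable (Spec_find_nearest_nation_py x y exclude_nation nation_map out) := by unfold Spec_find_nearest_nation_py; infer_instance

-- ===== CLAIM (what is proved, stated in full; the proofs are below) =====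
def Claim_equal_find_nearest_nation_py : Prop := ∀ (x : Int) (y : Int) (exclude_nation : Int) (nation_map : List (Int × Int × Int)), Dom_find_nearest_nation_py x y exclude_nation nation_map → Pre_find_nearest_nation_py x y exclude_nation nation_map → Spec_find_nearest_nation_py x y exclude_nation nation_map (find_nearest_nation_py x y exclude_nation nation_map)

-- ===== LEMMAS AND PROOFS =====

-- the offset-scan order of A, and the hit test at one offset
def pvHit (x y ex : Int) (m : List (Int × Int × Int)) (d : Int × Int) : Option Int :=
  match pvGetPos? m (x + d.1) (y + d.2) with
  | some v => if v ≠ ex then some v else none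
  | none => none

def pvRing (r : Int) : List (Int × Int) :=
  (PySem.List.pyRange (-r) (r+1) 1).flatMap (fun dx =>
    ((PySem.List.pyRange (-r) (r+1) 1).filter (fun dy => decide (|dx| = r ∨ |dy| = r))).map (fun dy => (dx, dy)))

def pvScan : List (Int × Int) := (PySem.List.pyRange 1 50 1).flatMap pvRing

def pvK (d : Int × Int) : Int × Int × Int := (max |d.1| |d.2|, d.1, d.2)

def pvCand (x y ex : Int) (t : Int × Int × Int) : Prop :=
  t.2.2 ≠ ex ∧ 1 ≤ max |t.1 - x| |t.2.1 - y| ∧ max |t.1 - x| |t.2.1 - y| ≤ 49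

def pvKey (x y : Int) (t : Int × Int × Int) : Int × Int × Int :=
  (max |t.1 - x| |t.2.1 - y|, t.1 - x, t.2.1 - y)

-- key-order facts
lemma pvKeyLt_irrefl (a : Int × Int × Int) : pvKeyLt a a = false := by
  obtain ⟨a1, a2, a3⟩ := a
  simp [pvKeyLt]

lemma pvKeyLt_trans {a b c : Int × Int × Int} (h1 : pvKeyLt a b = true) (h2 : pvKeyLt b c = true) :
    pvKeyLt a c = true := by
  obtain ⟨a1, a2, a3⟩ := a; obtain ⟨b1, b2, b3⟩ := b; obtain ⟨c1, c2, c3⟩ := c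
  simp only [pvKeyLt, Bool.or_eq_true, Bool.and_eq_true, decide_eq_true_eq] at *
  omega

lemma pvKeyLt_total {a b : Int × Int × Int} (h1 : pvKeyLt a b = false) (h2 : pvKeyLt b a = false) :
    a = b := by
  obtain ⟨a1, a2, a3⟩ := a; obtain ⟨b1, b2, b3⟩ := b
  simp only [pvKeyLt, Bool.or_eq_false_iff, Bool.and_eq_false_iff, decide_eq_false_iff_not,
    Bool.or_eq_false_iff] at *
  simp only [Prod.mk.injEq]
  omega

lemma pvKeyLt_asymm {a b : Int × Int × Int} (h1 : pvKeyLt a b = true) : pvKeyLt b a = false := by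
  obtain ⟨a1, a2, a3⟩ := a; obtain ⟨b1, b2, b3⟩ := b
  simp only [pvKeyLt, Bool.or_eq_true, Bool.and_eq_true, decide_eq_true_eq, Bool.or_eq_false_iff,
    Bool.and_eq_false_iff, decide_eq_false_iff_not] at *
  omega

-- early-return foldl = findSome?
lemma pvLoop_aux {β : Type} (f : Int → Option β) :
    ∀ (l : List Int) (acc : Option β),
      l.foldl (fun a x => match a with | some v => some v | none => f x) acc
        = match acc with | some v => some v | none => l.findSome? f := by
  intro l
  induction l with
  | nil => intro acc; cases acc <;> simp
  | cons a l ih =>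
    intro acc
    cases acc with
    | some v => simp [List.foldl_cons, ih]
    | none =>
      simp only [List.foldl_cons, List.findSome?_cons]
      cases h : f a <;> simp [ih]

lemma pvLoop_eq {β : Type} (l : List Int) (f : Int → Option β) :
    pvLoop l f = l.findSome? f := by
  unfold pvLoop; rw [pvLoop_aux]

lemma findSome?_flatMap {α β γ : Type} (g : α → List β) (f : β → Option γ) :
    ∀ l : List α, (l.flatMap g).findSome? f = l.findSome? (fun a => (g a).findSome? f) := by
  intro l
  induction l with
  | nil => simp
  | cons a l ih =>
    simp only [List.flatMap_cons, List.findSome?_append, List.findSome?_cons]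
    cases h : (g a).findSome? f <;> simp [ih]

lemma findSome?_filter_map {α β γ : Type} (p : α → Bool) (g : α → β) (f : β → Option γ) :
    ∀ l : List α, ((l.filter p).map g).findSome? f
        = l.findSome? (fun a => if p a then f (g a) else none) := by
  intro l
  induction l with
  | nil => simp
  | cons a l ih =>
    by_cases h : p a
    · simp [List.filter_cons, h, List.findSome?_cons, ih]
    · simp [List.filter_cons, h, ih]

lemma findSome?_ext {α β : Type} {f g : α → Option β} :
    ∀ {l : List α}, (∀ a ∈ l, f a = g a) → l.findSome? f = l.findSome? g := by
  intro l
  induction l with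
  | nil => intro _; rfl
  | cons a l ih =>
    intro h
    rw [List.findSome?_cons, List.findSome?_cons, h a List.mem_cons_self,
      ih (fun b hb => h b (List.mem_cons_of_mem _ hb))]

-- A's nested loops compute the first hit along pvScan
lemma scan_findSome (x y ex : Int) (m : List (Int × Int × Int)) :
    pvScan.findSome? (pvHit x y ex m)
      = (PySem.List.pyRange 1 50 1).findSome? (fun radius =>
          (PySem.List.pyRange (-radius) (radius+1) 1).findSome? (fun dx =>
            (PySem.List.pyRange (-radius) (radius+1) 1).findSome? (fun dy =>
              if |dx| = radius ∨ |dy| = radius then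
                match pvGetPos? m (x + dx) (y + dy) with
                | some v => if v ≠ ex then some v else none
                | none => none
              else none))) := by
  unfold pvScan pvRing
  rw [findSome?_flatMap]
  apply findSome?_ext
  intro radius _
  rw [findSome?_flatMap]
  apply findSome?_ext
  intro dx _
  rw [findSome?_filter_map]
  apply findSome?_ext
  intro dy _
  simp only [decide_eq_true_eq, pvHit]

lemma A_eq_scan (x y ex : Int) (m : List (Int × Int × Int)) :
    find_nearest_nation_py x y ex m
      = match pvScan.findSome? (pvHit x y ex m) with
        | some v => v
        | none => 0 := by
  unfold find_nearest_nation_py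
  simp only [pvLoop_eq]
  rw [scan_findSome]

-- lookup vs membership
lemma mem_of_getPos {m : List (Int × Int × Int)} {px py v : Int}
    (h : pvGetPos? m px py = some v) : (px, py, v) ∈ m := by
  unfold pvGetPos? at h
  cases hf : m.find? (fun t => t.1 == px && t.2.1 == py) with
  | none => rw [hf] at h; simp at h
  | some t =>
    rw [hf] at h
    simp only [Option.map_some, Option.some.injEq] at h
    have hmem := List.mem_of_find?_eq_some hf
    have hp := List.find?_some hf
    simp only [Bool.and_eq_true, beq_iff_eq] at hp
    obtain ⟨t1, t2, t3⟩ := t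
    simp only at hp h
    rw [← hp.1, ← hp.2, ← h]
    exact hmem

lemma getPos_of_mem {m : List (Int × Int × Int)} {t : Int × Int × Int}
    (hN : m.Pairwise (fun s t => (s.1, s.2.1) ≠ (t.1, t.2.1)))
    (hmem : t ∈ m) : pvGetPos? m t.1 t.2.1 = some t.2.2 := by
  induction m with
  | nil => cases hmem
  | cons a m ih =>
    rcases List.mem_cons.mp hmem with rfl | hmem'
    · unfold pvGetPos?
      simp [List.find?_cons_of_pos]
    · have ha : (a.1, a.2.1) ≠ (t.1, t.2.1) := (List.pairwise_cons.mp hN).1 t hmem'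
      unfold pvGetPos?
      rw [List.find?_cons_of_neg]
      · exact ih (List.pairwise_cons.mp hN).2 hmem'
      · simp only [Bool.and_eq_true, beq_iff_eq, not_and]
        intro h1 h2
        exact absurd (by rw [h1, h2]) ha

-- ring membership characterization
lemma ring_char (a b r : Int) :
    ((-r ≤ a ∧ a < r + 1) ∧ (-r ≤ b ∧ b < r + 1) ∧ (|a| = r ∨ |b| = r)) ↔ max |a| |b| = r := by
  rcases abs_cases a with ⟨ha, _⟩ | ⟨ha, _⟩ <;> rcases abs_cases b with ⟨hb, _⟩ | ⟨hb, _⟩ <;>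
    rw [ha, hb, max_def] <;> split_ifs <;> omega

lemma mem_pvRing {d : Int × Int} {r : Int} : d ∈ pvRing r ↔ max |d.1| |d.2| = r := by
  obtain ⟨a, b⟩ := d
  rw [show max |(a, b).1| |(a, b).2| = max |a| |b| from rfl, ← ring_char a b r]
  simp only [pvRing, List.mem_flatMap, List.mem_map, List.mem_filter,
    PySem.List.mem_pyRange_one, decide_eq_true_eq, Prod.mk.injEq]
  constructor
  · rintro ⟨dx, hdx, dy, ⟨⟨hdy, hcond⟩, rfl, rfl⟩⟩
    exact ⟨hdx, hdy, hcond⟩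
  · rintro ⟨h1, h2, h3⟩
    exact ⟨a, h1, b, ⟨⟨h2, h3⟩, rfl, rfl⟩⟩

lemma mem_pvScan {d : Int × Int} :
    d ∈ pvScan ↔ 1 ≤ max |d.1| |d.2| ∧ max |d.1| |d.2| ≤ 49 := by
  simp only [pvScan, List.mem_flatMap, PySem.List.mem_pyRange_one, mem_pvRing]
  constructor
  · rintro ⟨r, ⟨h1, h2⟩, rfl⟩; omega
  · intro ⟨h1, h2⟩; exact ⟨max |d.1| |d.2|, ⟨h1, by omega⟩, rfl⟩

-- pvScan is strictly sorted by the key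
lemma pvScan_sorted : pvScan.Pairwise (fun a b => pvKeyLt (pvK a) (pvK b) = true) := by
  unfold pvScan
  rw [List.pairwise_flatMap]
  constructor
  · intro r _
    unfold pvRing
    rw [List.pairwise_flatMap]
    constructor
    · intro dx hdx
      rw [List.pairwise_map]
      have hbase : ((PySem.List.pyRange (-r) (r+1) 1).filter
          (fun dy => decide (|dx| = r ∨ |dy| = r))).Pairwise (· < ·) :=
        (PySem.List.pairwise_lt_pyRange_one (-r) (r+1)).filter _
      refine hbase.imp_of_mem ?_
      intro dy1 dy2 h1 h2 hlt
      have m1 : max |dx| |dy1| = r := mem_pvRing.mp (by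
        unfold pvRing
        exact List.mem_flatMap.mpr ⟨dx, hdx, List.mem_map.mpr ⟨dy1, h1, rfl⟩⟩)
      have m2 : max |dx| |dy2| = r := mem_pvRing.mp (by
        unfold pvRing
        exact List.mem_flatMap.mpr ⟨dx, hdx, List.mem_map.mpr ⟨dy2, h2, rfl⟩⟩)
      show pvKeyLt (max |dx| |dy1|, dx, dy1) (max |dx| |dy2|, dx, dy2) = true
      rw [m1, m2]
      simp [pvKeyLt]
      omega
    · have hbase : (PySem.List.pyRange (-r) (r+1) 1).Pairwise (· < ·) :=
        PySem.List.pairwise_lt_pyRange_one (-r) (r+1)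
      refine hbase.imp_of_mem ?_
      intro dx1 dx2 hdx1 hdx2 hlt
      intro u hu v hv
      obtain ⟨dy1, hdy1, hequ⟩ := List.mem_map.mp hu
      obtain ⟨dy2, hdy2, heqv⟩ := List.mem_map.mp hv
      subst hequ; subst heqv
      have m1 : max |dx1| |dy1| = r := mem_pvRing.mp (by
        unfold pvRing
        exact List.mem_flatMap.mpr ⟨dx1, hdx1, List.mem_map.mpr ⟨dy1, hdy1, rfl⟩⟩)
      have m2 : max |dx2| |dy2| = r := mem_pvRing.mp (by
        unfold pvRing
        exact List.mem_flatMap.mpr ⟨dx2, hdx2, List.mem_map.mpr ⟨dy2, hdy2, rfl⟩⟩)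
      show pvKeyLt (max |dx1| |dy1|, dx1, dy1) (max |dx2| |dy2|, dx2, dy2) = true
      rw [m1, m2]
      simp [pvKeyLt]
      omega
  · have hbase : (PySem.List.pyRange 1 50 1).Pairwise (· < ·) :=
      PySem.List.pairwise_lt_pyRange_one 1 50
    refine hbase.imp_of_mem ?_
    intro r1 r2 _ _ hlt
    intro u hu v hv
    obtain ⟨u1, u2⟩ := u
    obtain ⟨v1, v2⟩ := v
    have m1 : max |u1| |u2| = r1 := mem_pvRing.mp hu
    have m2 : max |v1| |v2| = r2 := mem_pvRing.mp hv
    show pvKeyLt (max |u1| |u2|, u1, u2) (max |v1| |v2|, v1, v2) = true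
    rw [m1, m2]
    simp [pvKeyLt]
    omega

-- first hit along a strictly key-sorted list is the key-minimal hit
lemma findSome?_min {α β : Type} {P : α → α → Prop} (hasym : ∀ a b, P a b → ¬ P b a)
    {f : α → Option β} {v : β} :
    ∀ {L : List α}, L.Pairwise P → L.findSome? f = some v →
      ∃ d ∈ L, f d = some v ∧ ∀ d' ∈ L, P d' d → f d' = none := by
  intro L
  induction L with
  | nil => intro _ h; simp at h
  | cons a L ih =>
    intro hp h
    rw [List.findSome?_cons] at h
    cases hfa : f a with
    | some w =>
      rw [hfa] at h
      simp only [Option.some.injEq] at h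
      subst h
      refine ⟨a, List.mem_cons_self, hfa, ?_⟩
      intro d' hd' hP
      rcases List.mem_cons.mp hd' with rfl | hd''
      · exact absurd hP (hasym _ _ hP)
      · exact absurd hP (hasym _ _ ((List.pairwise_cons.mp hp).1 d' hd''))
    | none =>
      rw [hfa] at h
      obtain ⟨d, hd, hfd, hmin⟩ := ih (List.pairwise_cons.mp hp).2 h
      refine ⟨d, List.mem_cons_of_mem _ hd, hfd, ?_⟩
      intro d' hd' hP
      rcases List.mem_cons.mp hd' with rfl | hd''
      · exact hfa
      · exact hmin d' hd'' hP

-- single step of B's fold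
lemma step_none {x y ex : Int} {acc : Option ((Int × Int × Int) × Int)} {t : Int × Int × Int} :
    pvBestStep x y ex acc t = none ↔ acc = none ∧ ¬ pvCand x y ex t := by
  cases acc with
  | none =>
    simp only [pvBestStep, pvCand]
    split_ifs with h1 h2 <;> simp_all
  | some b =>
    simp only [pvBestStep, pvCand]
    split_ifs with h1 h2 h3 <;> simp_all

lemma step_some {x y ex : Int} {acc : Option ((Int × Int × Int) × Int)} {t : Int × Int × Int}
    {b : (Int × Int × Int) × Int} (h : pvBestStep x y ex acc t = some b) :
    (acc = some b ∨ (pvCand x y ex t ∧ b = (pvKey x y t, t.2.2))) ∧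
    (∀ a, acc = some a → pvKeyLt a.1 b.1 = false) ∧
    (pvCand x y ex t → pvKeyLt (pvKey x y t) b.1 = false) := by
  cases acc with
  | none =>
    simp only [pvBestStep] at h
    split_ifs at h with h1 h2
    · simp only [Option.some.injEq] at h
      subst h
      refine ⟨Or.inr ⟨⟨h1, h2.1, h2.2⟩, rfl⟩, ?_, ?_⟩
      · intro a ha; cases ha
      · intro _; exact pvKeyLt_irrefl _
  | some a0 =>
    simp only [pvBestStep] at h
    split_ifs at h with h1 h2 h3 <;> simp only [Option.some.injEq] at h <;> subst h
    · -- replaced by the new candidate (h3 : new key < a0's key)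
      refine ⟨Or.inr ⟨⟨h1, h2.1, h2.2⟩, rfl⟩, ?_, ?_⟩
      · intro a ha
        simp only [Option.some.injEq] at ha
        subst ha
        exact pvKeyLt_asymm h3
      · intro _; exact pvKeyLt_irrefl _
    · -- kept a0 (h3 : ¬ new key < a0's key)
      refine ⟨Or.inl rfl, ?_, ?_⟩
      · intro a ha
        simp only [Option.some.injEq] at ha
        subst ha
        exact pvKeyLt_irrefl _
      · intro _
        simpa [pvKey] using Bool.not_eq_true _ ▸ (by simpa using h3)
    · -- radius out of range: t is no candidate
      refine ⟨Or.inl rfl, ?_, ?_⟩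
      · intro a ha
        simp only [Option.some.injEq] at ha
        subst ha
        exact pvKeyLt_irrefl _
      · intro hc; exact absurd ⟨hc.2.1, hc.2.2⟩ h2
    · -- excluded nation: t is no candidate
      refine ⟨Or.inl rfl, ?_, ?_⟩
      · intro a ha
        simp only [Option.some.injEq] at ha
        subst ha
        exact pvKeyLt_irrefl _
      · intro hc; exact absurd hc.1 h1

-- B's fold: characterization of the running minimum
lemma bfold_char (x y ex : Int) :
    ∀ (m : List (Int × Int × Int)) (acc : Option ((Int × Int × Int) × Int)),
      (m.foldl (pvBestStep x y ex) acc = none ↔ (acc = none ∧ ∀ t ∈ m, ¬ pvCand x y ex t)) ∧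
      (∀ b, m.foldl (pvBestStep x y ex) acc = some b →
        (acc = some b ∨ ∃ t ∈ m, pvCand x y ex t ∧ b = (pvKey x y t, t.2.2)) ∧
        (∀ a, acc = some a → pvKeyLt a.1 b.1 = false) ∧
        (∀ t ∈ m, pvCand x y ex t → pvKeyLt (pvKey x y t) b.1 = false)) := by
  intro m
  induction m with
  | nil =>
    intro acc
    refine ⟨by simp, ?_⟩
    intro b hb
    simp only [List.foldl_nil] at hb
    refine ⟨Or.inl hb, ?_, by simp⟩
    intro a ha
    rw [hb] at ha
    simp only [Option.some.injEq] at ha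
    subst ha
    exact pvKeyLt_irrefl _
  | cons t m ih =>
    intro acc
    rw [List.foldl_cons]
    obtain ⟨ihn, ihs⟩ := ih (pvBestStep x y ex acc t)
    constructor
    · rw [ihn]
      constructor
      · rintro ⟨h1, h2⟩
        obtain ⟨ha, hc⟩ := step_none.mp h1
        refine ⟨ha, ?_⟩
        intro t' ht'
        rcases List.mem_cons.mp ht' with rfl | h
        · exact hc
        · exact h2 t' h
      · rintro ⟨ha, hall⟩
        refine ⟨step_none.mpr ⟨ha, hall t List.mem_cons_self⟩, ?_⟩
        intro t' h; exact hall t' (List.mem_cons_of_mem _ h)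
    · intro b hb
      obtain ⟨hsrc, haccmin, hmmin⟩ := ihs b hb
      rcases hsrc with hstep | ⟨t', ht'm, ht'c, hbeq⟩
      · -- b came through the step on t
        obtain ⟨hsrc0, hmin0, htmin0⟩ := step_some hstep
        refine ⟨?_, ?_, ?_⟩
        · rcases hsrc0 with h | ⟨hc, he⟩
          · exact Or.inl h
          · exact Or.inr ⟨t, List.mem_cons_self, hc, he⟩
        · exact hmin0
        · intro t'' ht'' hc''
          rcases List.mem_cons.mp ht'' with rfl | h
          · exact htmin0 hc''
          · -- t'' ∈ m: covered by the inner fold's minimality relative to acc' = some b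
            exact hmmin t'' h hc''
      · -- b is a candidate from m
        refine ⟨Or.inr ⟨t', List.mem_cons_of_mem _ ht'm, ht'c, hbeq⟩, ?_, ?_⟩
        · -- minimality vs. the initial acc
          intro a ha
          cases hstep : pvBestStep x y ex acc t with
          | none =>
            obtain ⟨ha0, _⟩ := step_none.mp hstep
            rw [ha0] at ha; cases ha
          | some a' =>
            have hinner := haccmin a' hstep
            obtain ⟨hsrc0, hmin0, _⟩ := step_some hstep
            by_contra hcon
            have hcon' : pvKeyLt a.1 b.1 = true := by
              cases hx : pvKeyLt a.1 b.1 with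
              | false => exact absurd hx hcon
              | true => rfl
            rcases hsrc0 with h' | ⟨_, he'⟩
            · rw [ha] at h'
              simp only [Option.some.injEq] at h'
              subst h'
              rw [hcon'] at hinner; cases hinner
            · have h2 := hmin0 a ha
              -- ¬ a.1 < a'.1 and ¬ a'.1 < b.1 and a.1 < b.1 : contradiction via totality
              cases hx : pvKeyLt a'.1 a.1 with
              | false =>
                have := pvKeyLt_total h2 hx
                rw [this] at hcon'
                rw [hcon'] at hinner; cases hinner
              | true =>
                have := pvKeyLt_trans hx hcon'
                rw [this] at hinner; cases hinner
        · intro t'' ht'' hc''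
          rcases List.mem_cons.mp ht'' with rfl | h
          · -- t itself: its key reached the inner fold via the step
            cases hstep : pvBestStep x y ex acc t'' with
            | none => exact absurd (step_none.mp hstep).2 (by simpa using hc'')
            | some a' =>
              have hinner := haccmin a' hstep
              obtain ⟨_, _, htmin0⟩ := step_some hstep
              have h2 := htmin0 hc''
              by_contra hcon
              have hcon' : pvKeyLt (pvKey x y t'') b.1 = true := by
                cases hx : pvKeyLt (pvKey x y t'') b.1 with
                | false => exact absurd hx hcon
                | true => rfl
              cases hx : pvKeyLt a'.1 (pvKey x y t'') with
              | false =>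
                have := pvKeyLt_total h2 hx
                rw [this] at hcon'
                rw [hcon'] at hinner; cases hinner
              | true =>
                have := pvKeyLt_trans hx hcon'
                rw [this] at hinner; cases hinner
          · exact hmmin t'' h hc''

-- the candidate / scan-hit correspondence (under Pre_)
lemma cand_to_hit {x y ex : Int} {m : List (Int × Int × Int)}
    (hN : m.Pairwise (fun s t => (s.1, s.2.1) ≠ (t.1, t.2.1)))
    {t : Int × Int × Int} (hmem : t ∈ m) (hc : pvCand x y ex t) :
    (t.1 - x, t.2.1 - y) ∈ pvScan ∧ pvHit x y ex m (t.1 - x, t.2.1 - y) = some t.2.2 := by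
  constructor
  · rw [mem_pvScan]; exact ⟨hc.2.1, hc.2.2⟩
  · unfold pvHit
    have e1 : x + ((t.1 - x, t.2.1 - y) : Int × Int).1 = t.1 := by simp
    have e2 : y + ((t.1 - x, t.2.1 - y) : Int × Int).2 = t.2.1 := by simp
    rw [e1, e2, getPos_of_mem hN hmem]
    simp [hc.1]

lemma hit_to_cand {x y ex : Int} {m : List (Int × Int × Int)} {d : Int × Int} {v : Int}
    (hd : d ∈ pvScan) (hh : pvHit x y ex m d = some v) :
    (x + d.1, y + d.2, v) ∈ m ∧ pvCand x y ex (x + d.1, y + d.2, v) ∧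
      pvKey x y (x + d.1, y + d.2, v) = pvK d := by
  unfold pvHit at hh
  cases hg : pvGetPos? m (x + d.1) (y + d.2) with
  | none => rw [hg] at hh; simp at hh
  | some w =>
    simp only [hg] at hh
    by_cases hw : w ≠ ex
    · rw [if_pos hw] at hh
      simp only [Option.some.injEq] at hh
      subst hh
      have hmem := mem_of_getPos hg
      have hb := mem_pvScan.mp hd
      have e1 : x + d.1 - x = d.1 := by ring
      have e2 : y + d.2 - y = d.2 := by ring
      refine ⟨hmem, ⟨hw, ?_, ?_⟩, ?_⟩
      · show 1 ≤ max |x + d.1 - x| |y + d.2 - y|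
        rw [e1, e2]; exact hb.1
      · show max |x + d.1 - x| |y + d.2 - y| ≤ 49
        rw [e1, e2]; exact hb.2
      · simp only [pvKey, pvK]; rw [e1, e2]
    · simp [hw] at hh

-- ===== VERDICT (by name: the statement is the Claim_ definition above) =====
theorem find_nearest_nation_py_spec : Claim_equal_find_nearest_nation_py := by
  intro x y ex m _ hPre
  unfold Spec_find_nearest_nation_py
  rw [A_eq_scan]
  unfold find_nearest_nation_py_alt
  obtain ⟨hn, hs⟩ := bfold_char x y ex m none
  cases hres : pvScan.findSome? (pvHit x y ex m) with
  | none =>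
    have hfold : m.foldl (pvBestStep x y ex) none = none := by
      rw [hn]
      refine ⟨rfl, ?_⟩
      intro t ht hc
      obtain ⟨hsc, hh⟩ := cand_to_hit hPre ht hc
      have := (List.findSome?_eq_none_iff.mp hres) _ hsc
      rw [hh] at this; cases this
    rw [hfold]
  | some v =>
    obtain ⟨d, hdmem, hfd, hmin⟩ := findSome?_min
      (fun a b hab h2 => by rw [pvKeyLt_asymm hab] at h2; cases h2) pvScan_sorted hres
    obtain ⟨htmem, htc, htk⟩ := hit_to_cand hdmem hfd
    cases hfold : m.foldl (pvBestStep x y ex) none with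
    | none => exact absurd htc ((hn.mp hfold).2 _ htmem)
    | some b =>
      obtain ⟨hsrc, _, hminB⟩ := hs b hfold
      rcases hsrc with h | ⟨t', ht'm, ht'c, rfl⟩
      · cases h
      · have h1 : pvKeyLt (pvK d) (pvKey x y t') = false := by
          have := hminB _ htmem htc
          rw [htk] at this
          exact this
        obtain ⟨hsc', hh'⟩ := cand_to_hit hPre ht'm ht'c
        have h2 : pvKeyLt (pvKey x y t') (pvK d) = false := by
          cases hx : pvKeyLt (pvKey x y t') (pvK d) with
          | false => rfl
          | true =>
            have hP : pvKeyLt (pvK ((t'.1 - x, t'.2.1 - y) : Int × Int)) (pvK d) = true := hx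
            have := hmin _ hsc' hP
            rw [hh'] at this; cases this
        have hkeq : pvK d = pvKey x y t' := pvKeyLt_total h1 h2
        have hoff : ((t'.1 - x, t'.2.1 - y) : Int × Int) = d := by
          obtain ⟨d1, d2⟩ := d
          simp only [pvK, pvKey, Prod.mk.injEq] at hkeq
          simp only [Prod.mk.injEq]
          exact ⟨hkeq.2.1.symm, hkeq.2.2.symm⟩
        rw [hoff, hfd] at hh'
        simp only [Option.some.injEq] at hh'
        simp [hh']
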